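-- pv_equiv track=rewrite | github.com/ty-hayes-82/simulation | golfsim/analysis/delivery_runner_metrics copy.py | _calculate_capacity_15min_window
-- ===== SOURCE A (Python) =====
-- from typing import Any, Dict, List, Optional, Tuple
--
-- def _calculate_capacity_15min_window(orders: List[Dict[str, Any]], sla_minutes: int) -> int:
--     """Calculate maximum orders that can be processed in a 15-minute window before SLA breach."""
--     if not orders:
--         return 0
--
--     # Group orders by 15-minute windows
--     window_orders = {}
--     window_size = 15 * 60  # 15 minutes in seconds
--
--     for order in orders:
--         order_time = order.get('order_time_s', 0)
--         window_start = (order_time // window_size) * window_size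
--         window_key = int(window_start)
--
--         if window_key not in window_orders:
--             window_orders[window_key] = 0
--         window_orders[window_key] += 1
--
--     # Find the window with maximum orders
--     max_orders = max(window_orders.values()) if window_orders else 0
--
--     return max_orders
-- ===== SOURCE B (Python) =====
-- from itertools import groupby
-- from typing import Any, Dict, List
--
--
-- def _calculate_capacity_15min_window(orders: List[Dict[str, Any]], sla_minutes: int) -> int:
--     """Max orders in any 15-minute window: sort the window keys, scan runs of equal keys."""
--     keys = sorted(int((order.get('order_time_s', 0) // 900) * 900) for order in orders)
--     return max((len(list(g)) for _, g in groupby(keys)), default=0)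
-- ===== Notes on version B (the rewrite author's own statement) =====
-- stated objective: idiomatic
-- what changed: Replaces the explicit dict histogram plus max-over-values with a sort of the 15-minute window keys followed by an itertools.groupby scan of consecutive equal keys (max run length, default 0 for empty input).
import Mathlib
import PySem

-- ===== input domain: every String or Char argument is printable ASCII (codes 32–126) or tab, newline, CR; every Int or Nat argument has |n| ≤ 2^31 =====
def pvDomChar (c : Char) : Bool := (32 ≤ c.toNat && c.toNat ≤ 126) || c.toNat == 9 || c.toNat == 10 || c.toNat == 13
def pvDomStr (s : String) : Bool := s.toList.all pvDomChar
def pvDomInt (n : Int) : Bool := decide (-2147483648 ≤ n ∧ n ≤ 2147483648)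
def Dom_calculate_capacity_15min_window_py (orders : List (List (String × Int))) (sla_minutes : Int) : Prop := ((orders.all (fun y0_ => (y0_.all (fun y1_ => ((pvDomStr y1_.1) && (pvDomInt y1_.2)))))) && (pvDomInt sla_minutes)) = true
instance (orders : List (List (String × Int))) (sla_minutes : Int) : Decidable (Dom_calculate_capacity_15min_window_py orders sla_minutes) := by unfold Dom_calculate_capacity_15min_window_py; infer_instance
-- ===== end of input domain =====

-- B replaces A's dict histogram by sort-the-window-keys + scan of consecutive equal runs (idiomatic groupby form); same value everywhere.

-- ===== PORT A =====
def calculate_capacity_15min_window_py (orders : List (List (String × Int))) (sla_minutes : Int) : Int :=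
  if orders = [] then 0
  else
    let window_size : Int := 15 * 60
    let window_orders : PySem.Dict Int Int := orders.foldl (fun d order =>
      let order_time := (PySem.Dict.mk order).getD "order_time_s" 0
      let window_start := PySem.Int.floordiv order_time window_size * window_size
      let window_key := window_start
      let d := if d.contains window_key then d else d.insert window_key 0
      d.modify window_key 0 (· + 1)) (PySem.Dict.mk [])
    -- max(values) raises only on an empty dict, which the truthiness test guards; .getD 0 is never the value taken
    if window_orders.size ≠ 0 then (PySem.List.max? window_orders.values (fun v => v)).getD 0 else 0

-- ===== PORT B =====
def calculate_capacity_15min_window_py_alt (orders : List (List (String × Int))) (sla_minutes : Int) : Int :=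
  let keys := PySem.List.sorted (orders.map (fun order =>
      PySem.Int.floordiv ((PySem.Dict.mk order).getD "order_time_s" 0) 900 * 900)) (fun k => k)
  PySem.List.maxD ((keys.splitBy (fun a b => a == b)).map (fun g => (g.length : Int))) (fun n => n) 0

-- ===== PRECONDITION & SPEC =====
def Spec_calculate_capacity_15min_window_py (orders : List (List (String × Int))) (sla_minutes : Int) (out : Int) : Prop := out = calculate_capacity_15min_window_py_alt orders sla_minutes
instance (orders : List (List (String × Int))) (sla_minutes : Int) (out : Int) : Decidable (Spec_calculate_capacity_15min_window_py orders sla_minutes out) := by unfold Spec_calculate_capacity_15min_window_py; infer_instance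

-- ===== CLAIM (what is proved, stated in full; the proofs are below) =====
def Claim_equal_calculate_capacity_15min_window_py : Prop := ∀ (orders : List (List (String × Int))) (sla_minutes : Int), Dom_calculate_capacity_15min_window_py orders sla_minutes → Spec_calculate_capacity_15min_window_py orders sla_minutes (calculate_capacity_15min_window_py orders sla_minutes)

-- ===== LEMMAS AND PROOFS =====

-- the common window-key function (proof-side abbreviation)
def pvWKey (order : List (String × Int)) : Int :=
  PySem.Int.floordiv ((PySem.Dict.mk order).getD "order_time_s" 0) 900 * 900

-- A's loop body equals the Counter step
lemma pv_step_eq (d : PySem.Dict Int Int) (k : Int) :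
    ((if d.contains k then d else d.insert k 0).modify k 0 (· + 1)) = d.modify k 0 (· + 1) := by
  by_cases h : d.contains k
  · simp [h]
  · simp only [h, Bool.false_eq_true, if_false, PySem.Dict.modify,
      PySem.Dict.getD_insert_self, PySem.Dict.insert_insert_self]
    rw [PySem.Dict.getD_of_not_contains d 0 (by simpa using h)]

-- A's fold is Counter(window keys)
lemma pv_fold_counter (orders : List (List (String × Int))) :
    orders.foldl (fun d order =>
      let order_time := (PySem.Dict.mk order).getD "order_time_s" 0
      let window_start := PySem.Int.floordiv order_time (15 * 60) * (15 * 60)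
      let window_key := window_start
      let d := if d.contains window_key then d else d.insert window_key 0
      d.modify window_key 0 (· + 1)) (PySem.Dict.mk [])
    = PySem.Dict.counter (orders.map pvWKey) := by
  rw [PySem.Dict.counter_eq_foldl, List.foldl_map]
  refine List.foldl_ext _ _ _ (fun d o _ => ?_)
  show ((if d.contains (pvWKey o) then d else d.insert (pvWKey o) 0).modify (pvWKey o) 0 (· + 1))
      = d.modify (pvWKey o) 0 (· + 1)
  exact pv_step_eq d (pvWKey o)

-- getD-of-max? over a list of nonnegative ints is the running max from 0
lemma pv_max_getD (xs : List Int) (h : ∀ x ∈ xs, 0 ≤ x) :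
    (PySem.List.max? xs (fun v => v)).getD 0 = xs.foldl max 0 := by
  cases xs with
  | nil => rfl
  | cons x t =>
    rw [PySem.List.max?_id_cons, Option.getD_some, List.foldl_cons,
        max_eq_right (h x List.mem_cons_self)]

-- the head of dropWhile fails the predicate
lemma pv_head_dropWhile (p : Int → Bool) (l : List Int) : ∀ b ∈ (l.dropWhile p).head?, p b = false := by
  induction l with
  | nil => simp
  | cons a t ih =>
    by_cases h : p a
    · simpa [List.dropWhile_cons, h] using ih
    · simpa [List.dropWhile_cons, h] using h

-- a constant list is a chain under ==
lemma pv_chain_const (a : Int) (tw : List Int) (h : ∀ x ∈ tw, x = a) :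
    tw.IsChain (fun x y => (x == y) = true) := by
  induction tw with
  | nil => exact List.isChain_nil
  | cons b r ih =>
    refine List.isChain_cons.mpr ⟨?_, ih (fun x hx => h x (List.mem_cons_of_mem _ hx))⟩
    intro y hy
    have hb := h b List.mem_cons_self
    have hyr : y ∈ r := List.mem_of_mem_head? hy
    have := h y (List.mem_cons_of_mem _ hyr)
    simp [hb, this]

-- Set-fold: an element absent from the fold list stays in front
lemma pv_set_fold_shift (a : Int) (dw : List Int) : ∀ (s : List Int), (∀ x ∈ dw, x ≠ a) →
    dw.foldl PySem.Set.add (a :: s) = a :: dw.foldl PySem.Set.add s := by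
  induction dw with
  | nil => intro s _; rfl
  | cons b r ih =>
    intro s hne
    have hb : b ≠ a := hne b List.mem_cons_self
    simp only [List.foldl_cons]
    have hadd : PySem.Set.add (a :: s) b = a :: PySem.Set.add s b := by
      by_cases h : b ∈ s <;> simp [PySem.Set.add, h, hb]
    rw [hadd, ih _ (fun x hx => hne x (List.mem_cons_of_mem _ hx))]

-- Set-fold: a constant run adds nothing new
lemma pv_set_fold_const (a : Int) (tw : List Int) (h : ∀ x ∈ tw, x = a) :
    tw.foldl PySem.Set.add [a] = [a] := by
  induction tw with
  | nil => rfl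
  | cons b r ih =>
    have hb : b = a := h b List.mem_cons_self
    subst hb
    have hone : PySem.Set.add [b] b = [b] := by simp [PySem.Set.add]
    simp only [List.foldl_cons, hone]
    exact ih (fun x hx => h x (List.mem_cons_of_mem _ hx))

-- run lengths of a sorted list are the per-distinct-value counts, in first-occurrence order
lemma pv_runs : ∀ (n : Nat) (l : List Int), l.length ≤ n → l.Pairwise (· ≤ ·) →
    (l.splitBy (fun a b => a == b)).map (fun g => (g.length : Int))
      = (PySem.Set.ofList l).map (fun v => (l.count v : Int)) := by
  intro n
  induction n with
  | zero =>
    intro l hl _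
    have : l = [] := List.length_eq_zero_iff.mp (Nat.le_zero.mp hl)
    subst this; rfl
  | succ n ih =>
    intro l hl hp
    cases l with
    | nil => rfl
    | cons a t =>
      set p : Int → Bool := fun x => x == a with hpdef
      set tw := (a :: t).takeWhile p with htw
      set dw := (a :: t).dropWhile p with hdw
      have hsplit : tw ++ dw = a :: t := List.takeWhile_append_dropWhile
      have htw_mem : ∀ x ∈ tw, x = a := fun x hx => by
        simpa [hpdef] using List.mem_takeWhile_imp hx
      have htw_cons : tw = a :: t.takeWhile p := List.takeWhile_cons_of_pos (by simp [hpdef])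
      have htw_ne : tw ≠ [] := by rw [htw_cons]; exact List.cons_ne_nil _ _
      have hat : ∀ x ∈ t, a ≤ x := (List.pairwise_cons.mp hp).1
      have hdw_mem : ∀ x ∈ dw, a < x := by
        cases hdwc : dw with
        | nil => simp
        | cons b r =>
          have hpb : p b = false := pv_head_dropWhile p (a :: t) b (by rw [← hdw, hdwc]; rfl)
          have hbne : b ≠ a := by simpa [hpdef] using hpb
          have hdsub : dw.Sublist (a :: t) := List.dropWhile_sublist p
          have hbmem : b ∈ a :: t := hdsub.mem (by rw [hdwc]; exact List.mem_cons_self)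
          have hab : a < b := by
            rcases List.mem_cons.mp hbmem with h | h
            · exact absurd h hbne
            · exact lt_of_le_of_ne (hat b h) (Ne.symm hbne)
          have hdp : dw.Pairwise (· ≤ ·) := hp.sublist hdsub
          intro x hx
          rcases List.mem_cons.mp hx with rfl | hxr
          · exact hab
          · have : b ≤ x := (List.pairwise_cons.mp (hdwc ▸ hdp)).1 x hxr
            exact lt_of_lt_of_le hab this
      have hdw_ne : ∀ x ∈ dw, x ≠ a := fun x hx => ne_of_gt (hdw_mem x hx)
      -- splitBy decomposition
      have hsb : (a :: t).splitBy (fun a b => a == b) = tw :: dw.splitBy (fun a b => a == b) := by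
        rw [← hsplit, List.splitBy_append, List.splitBy_of_isChain htw_ne (pv_chain_const a tw htw_mem)]
        · rfl
        · intro x hx y hy
          have hxa : x = a := htw_mem x (List.mem_of_mem_getLast? hx)
          have hya : y ≠ a := hdw_ne y (List.mem_of_mem_head? hy)
          subst hxa
          simpa using (Ne.symm hya)
      -- Set.ofList decomposition
      have hset : PySem.Set.ofList (a :: t) = a :: PySem.Set.ofList dw := by
        have h1 : PySem.Set.ofList (a :: t) = dw.foldl PySem.Set.add (tw.foldl PySem.Set.add PySem.Set.empty) := by
          unfold PySem.Set.ofList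
          rw [← hsplit, List.foldl_append]
        rw [h1, htw_cons]
        have h2 : PySem.Set.add PySem.Set.empty a = [a] := by simp [PySem.Set.add, PySem.Set.empty]
        rw [List.foldl_cons, h2, pv_set_fold_const a _ (fun x hx => htw_mem x (htw_cons ▸ List.mem_cons_of_mem _ hx)),
            show ([a] : List Int) = a :: PySem.Set.empty from rfl,
            pv_set_fold_shift a dw PySem.Set.empty hdw_ne]
        rfl
      -- counts
      have hcnt_a : (a :: t).count a = tw.length := by
        rw [← hsplit, List.count_append,
            List.count_eq_length.mpr (fun b hb => (htw_mem b hb).symm),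
            List.count_eq_zero.mpr (fun h => (hdw_ne a h) rfl)]
        rfl
      have hcnt_v : ∀ v ∈ PySem.Set.ofList dw, (a :: t).count v = dw.count v := by
        intro v hv
        have hvdw : v ∈ dw := (PySem.Set.mem_ofList dw v).mp hv
        have hvne : v ≠ a := hdw_ne v hvdw
        rw [← hsplit, List.count_append, List.count_eq_zero.mpr (fun h => hvne (htw_mem v h)), Nat.zero_add]
      -- IH
      have hdlen : dw.length ≤ n := by
        have hlen := congrArg List.length hsplit
        simp only [List.length_append, List.length_cons] at hlen
        simp only [List.length_cons] at hl
        have htl : 1 ≤ tw.length := by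
          rw [htw_cons]; simp
        omega
      have hdp : dw.Pairwise (· ≤ ·) := hp.sublist (List.dropWhile_sublist p)
      have hih := ih dw hdlen hdp
      rw [hsb, hset, List.map_cons, List.map_cons, hih, hcnt_a]
      congr 1
      exact (List.map_congr_left (fun v hv => by rw [hcnt_v v hv])).symm

-- ===== VERDICT (by name: the statement is the Claim_ definition above) =====
theorem calculate_capacity_15min_window_py_spec : Claim_equal_calculate_capacity_15min_window_py := by
  intro orders sla_minutes _
  unfold Spec_calculate_capacity_15min_window_py
  by_cases horders : orders = []
  · subst horders; rfl
  · rw [calculate_capacity_15min_window_py, calculate_capacity_15min_window_py_alt, if_neg horders]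
    simp only []
    rw [pv_fold_counter]
    set ks := orders.map pvWKey with hks
    have hks_ne : ks ≠ [] := by
      simpa [hks] using horders
    set ss := PySem.List.sorted ks (fun k => k) with hss
    have hperm : ss.Perm ks := PySem.List.sorted_perm ks (fun k => k) false
    have hpw : ss.Pairwise (· ≤ ·) := PySem.List.sorted_pairwise ks (fun k => k)
    -- A side
    have hvals : (PySem.Dict.counter ks).values
        = (PySem.Set.ofList ks).map (fun v => (ks.count v : Int)) := by
      show ((PySem.Dict.counter ks).items).map (·.2) = _
      rw [PySem.Dict.items_counter, List.map_map]
      rfl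
    have hsize : (PySem.Dict.counter ks).size ≠ 0 := by
      show ((PySem.Dict.counter ks).items).length ≠ 0
      rw [PySem.Dict.items_counter, List.length_map]
      have : ks.head hks_ne ∈ PySem.Set.ofList ks :=
        (PySem.Set.mem_ofList ks _).mpr (List.head_mem hks_ne)
      exact Nat.ne_of_gt (List.length_pos_of_mem this)
    rw [if_pos hsize, hvals]
    -- B side
    have hruns := pv_runs ss.length ss le_rfl hpw
    show _ = PySem.List.maxD ((ss.splitBy (fun a b => a == b)).map (fun g => (g.length : Int))) (fun n => n) 0
    rw [show ∀ xs : List Int, PySem.List.maxD xs (fun n => n) 0 = (PySem.List.max? xs (fun n => n)).getD 0 from fun _ => rfl]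
    rw [hruns]
    have hcnt : ∀ v, ss.count v = ks.count v := fun v => hperm.count_eq v
    have hB2 : (PySem.Set.ofList ss).map (fun v => (ss.count v : Int))
        = (PySem.Set.ofList ss).map (fun v => (ks.count v : Int)) :=
      List.map_congr_left (fun v _ => by rw [hcnt v])
    rw [hB2]
    have hsetperm : (PySem.Set.ofList ks).Perm (PySem.Set.ofList ss) := by
      rw [List.perm_ext_iff_of_nodup (PySem.Set.nodup_ofList ks) (PySem.Set.nodup_ofList ss)]
      intro v
      rw [PySem.Set.mem_ofList, PySem.Set.mem_ofList, PySem.List.mem_sorted]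
    have hmapperm : ((PySem.Set.ofList ks).map (fun v => (ks.count v : Int))).Perm
        ((PySem.Set.ofList ss).map (fun v => (ks.count v : Int))) := hsetperm.map _
    have hnnA : ∀ x ∈ (PySem.Set.ofList ks).map (fun v => (ks.count v : Int)), 0 ≤ x := by
      intro x hx
      obtain ⟨v, _, rfl⟩ := List.mem_map.mp hx
      exact Int.natCast_nonneg _
    have hnnB : ∀ x ∈ (PySem.Set.ofList ss).map (fun v => (ks.count v : Int)), 0 ≤ x := by
      intro x hx
      obtain ⟨v, _, rfl⟩ := List.mem_map.mp hx
      exact Int.natCast_nonneg _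
    rw [pv_max_getD _ hnnA, pv_max_getD _ hnnB]
    exact hmapperm.foldl_eq' (fun x _ y _ z => by rw [max_right_comm]) 0
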